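-- pv_equiv track=rewrite | github.com/gh0stintheshe11/LeetCode-Solutions | solutions/3155.maximum-number-of-upgradable-servers/Python3.py | maxUpgrades
-- ===== SOURCE A (Python) =====
-- from typing import List
--
-- def maxUpgrades(count: List[int], upgrade: List[int], sell: List[int], money: List[int]) -> List[int]:
--     def canUpgrade(ct, upCost, sellPrice, availMoney, numToUpgrade):
--         totalCost = numToUpgrade * upCost
--         availableMoney = availMoney + (ct - numToUpgrade) * sellPrice
--         return availableMoney >= totalCost
--
--     result = []
--     for i in range(len(count)):
--         low, high = 0, count[i]
--         while low < high:
--             mid = (low + high + 1) // 2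
--             if canUpgrade(count[i], upgrade[i], sell[i], money[i], mid):
--                 low = mid
--             else:
--                 high = mid - 1
--         result.append(low)
--     return result
-- ===== SOURCE B (Python) =====
-- from typing import List
--
-- def _upgradable(c: int, u: int, s: int, m: int) -> int:
--     # k upgrades are affordable iff k*(u+s) <= m + c*s (sell the c-k others).
--     total, budget = u + s, m + c * s
--     if total > 0:
--         k = budget // total          # direct formula for the positive-price case
--     elif budget >= 0:
--         k = c                        # non-positive total price: every upgrade is free or better
--     else:
--         k = 0
--     return max(0, min(c, k))
--
-- def maxUpgrades(count: List[int], upgrade: List[int], sell: List[int], money: List[int]) -> List[int]: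
--     return [_upgradable(c, u, s, m) for c, u, s, m in zip(count, upgrade, sell, money)]
-- ===== Notes on version B (the rewrite author's own statement) =====
-- stated objective: alternative
-- what changed: Replaces the per-query binary search over [0, count[i]] by a direct closed-form computation, (m + c*s)//(u+s) clamped to [0, c] (non-positive total price answered directly), in one zip comprehension.
-- outside the precondition, e.g. on maxUpgrades([2], [1], [-3], [5]): A returns [2], B returns [0]; on maxUpgrades([1, 2], [2], [3], [4]): A raises IndexError, B returns [1]
import Mathlib
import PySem

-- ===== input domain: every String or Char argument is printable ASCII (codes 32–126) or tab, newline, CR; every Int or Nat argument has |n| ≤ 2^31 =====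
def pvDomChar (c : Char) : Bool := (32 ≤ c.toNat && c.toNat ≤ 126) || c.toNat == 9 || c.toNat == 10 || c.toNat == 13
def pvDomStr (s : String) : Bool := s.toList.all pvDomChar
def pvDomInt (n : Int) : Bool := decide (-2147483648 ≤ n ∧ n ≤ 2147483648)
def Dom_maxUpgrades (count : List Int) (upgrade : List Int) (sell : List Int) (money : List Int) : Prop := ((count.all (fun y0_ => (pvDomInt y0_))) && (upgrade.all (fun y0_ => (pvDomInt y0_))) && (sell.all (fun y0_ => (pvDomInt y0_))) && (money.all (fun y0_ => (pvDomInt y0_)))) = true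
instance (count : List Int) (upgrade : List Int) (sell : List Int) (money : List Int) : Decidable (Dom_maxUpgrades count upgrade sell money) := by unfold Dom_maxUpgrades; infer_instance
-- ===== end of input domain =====

-- B replaces A's per-query binary search by a direct closed-form computation per query,
-- mapped over the zipped query lists (objective: alternative).


-- ===== PORT A =====
-- the inner 'while low < high' binary search of A, with canUpgrade inlined at its call site
def pvBinSearch (c u s m low high : Int) : Int :=
  if _h : low < high then
    let mid := PySem.Int.floordiv (low + high + 1) 2
    if m + (c - mid) * s ≥ mid * u then pvBinSearch c u s m mid high
    else pvBinSearch c u s m low (mid - 1)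
  else low
termination_by (high - low).toNat
decreasing_by
  · have := PySem.Int.floordiv_eq_ediv_of_pos (a := low + high + 1) (b := 2) (by norm_num)
    simp only [this]; omega
  · have := PySem.Int.floordiv_eq_ediv_of_pos (a := low + high + 1) (b := 2) (by norm_num)
    simp only [this]; omega

def maxUpgrades (count : List Int) (upgrade : List Int) (sell : List Int) (money : List Int) : List Int :=
  (PySem.List.pyRange 0 (count.length : Int) 1).foldl
    (fun result i =>
      result ++ [pvBinSearch (PySem.List.pyGetD count i 0) (PySem.List.pyGetD upgrade i 0)
                   (PySem.List.pyGetD sell i 0) (PySem.List.pyGetD money i 0)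
                   0 (PySem.List.pyGetD count i 0)]) []

-- ===== PORT B =====
def pvUpgradable (c u s m : Int) : Int :=
  let total := u + s
  let budget := m + c * s
  let k := if total > 0 then PySem.Int.floordiv budget total
           else if budget ≥ 0 then c else 0
  max 0 (min c k)

def maxUpgrades_alt (count : List Int) (upgrade : List Int) (sell : List Int) (money : List Int) : List Int :=
  (count.zip (upgrade.zip (sell.zip money))).map
    (fun x => pvUpgradable x.1 x.2.1 x.2.2.1 x.2.2.2)

-- ===== PRECONDITION & SPEC =====
-- Pre_ excludes query lists shorter than count (A raises IndexError) and queries with a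
-- positive count, negative total price upgrade[i]+sell[i] AND negative budget money[i]+
-- count[i]*sell[i]: there the affordability predicate is anti-monotone and A's value (0 or
-- count[i]) is an artefact of the first probe of its binary search, outside the problem's domain.
def Pre_maxUpgrades (count : List Int) (upgrade : List Int) (sell : List Int) (money : List Int) : Prop :=
  count.length ≤ upgrade.length ∧ count.length ≤ sell.length ∧ count.length ≤ money.length ∧
  (count.zip (upgrade.zip (sell.zip money))).all
    (fun x => decide (0 ≤ x.2.1 + x.2.2.1 ∨ x.1 ≤ 0 ∨ 0 ≤ x.2.2.2 + x.1 * x.2.2.1)) = true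
instance (count : List Int) (upgrade : List Int) (sell : List Int) (money : List Int) : Decidable (Pre_maxUpgrades count upgrade sell money) := by unfold Pre_maxUpgrades; infer_instance

def pvWitness_maxUpgrades : List Int × List Int × List Int × List Int :=
  ([4, 3], [3, 5], [2, -1], [8, 9])

def Spec_maxUpgrades (count : List Int) (upgrade : List Int) (sell : List Int) (money : List Int) (out : List Int) : Prop := out = maxUpgrades_alt count upgrade sell money
instance (count : List Int) (upgrade : List Int) (sell : List Int) (money : List Int) (out : List Int) : Decidable (Spec_maxUpgrades count upgrade sell money out) := by unfold Spec_maxUpgrades; infer_instance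

-- ===== CLAIM (what is proved, stated in full; the proofs are below) =====
def Claim_equal_maxUpgrades : Prop := ∀ (count : List Int) (upgrade : List Int) (sell : List Int) (money : List Int), Dom_maxUpgrades count upgrade sell money → Pre_maxUpgrades count upgrade sell money → Spec_maxUpgrades count upgrade sell money (maxUpgrades count upgrade sell money)

-- ===== LEMMAS AND PROOFS =====

-- The binary search returns t whenever t is the maximum k in [0, c] with k*(u+s) ≤ m + c*s
-- (predicate monotone: 0 ≤ u+s) and the current interval [low, high] ⊆ [0, c] contains t.
lemma pvBinSearch_eq (c u s m t : Int) (hd : 0 ≤ u + s)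
    (ht1 : 0 < t → t * (u + s) ≤ m + c * s) (_ht2 : t ≤ c)
    (hmax : ∀ x, x ≤ c → x * (u + s) ≤ m + c * s → x ≤ t) :
    ∀ n low high, (high - low).toNat = n → 0 ≤ low → low ≤ t → t ≤ high → high ≤ c →
      pvBinSearch c u s m low high = t := by
  intro n
  induction n using Nat.strong_induction_on with
  | _ n ih =>
    intro low high hn hl0 hlow thigh hhc
    rw [pvBinSearch]
    split
    · rename_i hlt
      have hmid : PySem.Int.floordiv (low + high + 1) 2 = (low + high + 1) / 2 :=
        PySem.Int.floordiv_eq_ediv_of_pos (by norm_num)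
      simp only [hmid]
      set mid := (low + high + 1) / 2 with hmiddef
      have hb1 : low < mid := by omega
      have hb2 : mid ≤ high := by omega
      split
      · rename_i hcond
        have hcond' : mid * (u + s) ≤ m + c * s := by nlinarith
        have hmt : mid ≤ t := hmax mid (le_trans hb2 hhc) hcond'
        exact ih (high - mid).toNat (by omega) mid high rfl (by omega) hmt thigh hhc
      · rename_i hcond
        have hcond' : ¬ mid * (u + s) ≤ m + c * s := by
          intro h; exact hcond (by nlinarith)
        have htm : t < mid := by
          by_contra h
          exact hcond' (le_trans (mul_le_mul_of_nonneg_right (by omega) hd) (ht1 (by omega)))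
        exact ih (mid - 1 - low).toNat (by omega) low (mid - 1) rfl hl0 hlow (by omega) (by omega)
    · rename_i hlt
      omega

-- If the affordability test holds on the whole remaining interval, the search returns high.
lemma pvBinSearch_all (c u s m : Int) :
    ∀ n low high, (high - low).toNat = n → low ≤ high →
      (∀ k, low < k → k ≤ high → m + (c - k) * s ≥ k * u) →
      pvBinSearch c u s m low high = high := by
  intro n
  induction n using Nat.strong_induction_on with
  | _ n ih =>
    intro low high hn hlh hall
    rw [pvBinSearch]
    split
    · rename_i hlt
      have hmid : PySem.Int.floordiv (low + high + 1) 2 = (low + high + 1) / 2 :=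
        PySem.Int.floordiv_eq_ediv_of_pos (by norm_num)
      simp only [hmid]
      set mid := (low + high + 1) / 2 with hmiddef
      have hb1 : low < mid := by omega
      have hb2 : mid ≤ high := by omega
      have hcond : m + (c - mid) * s ≥ mid * u := hall mid hb1 hb2
      simp only [ge_iff_le] at hcond
      rw [if_pos hcond]
      exact ih (high - mid).toNat (by omega) mid high rfl hb2
        (fun k hk1 hk2 => hall k (by omega) hk2)
    · rename_i hlt
      omega

-- Per query, outside the excluded band the search equals B's direct computation.
lemma pvBinSearch_closed (c u s m : Int)
    (h : 0 ≤ u + s ∨ c ≤ 0 ∨ 0 ≤ m + c * s) :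
    pvBinSearch c u s m 0 c = pvUpgradable c u s m := by
  unfold pvUpgradable
  simp only [gt_iff_lt, ge_iff_le]
  set M := m + c * s with hM
  by_cases hc : c ≤ 0
  · rw [pvBinSearch]
    have h1 : ¬ (0 : Int) < c := by omega
    simp only [h1, dite_false]
    have h2 : min c (if 0 < u + s then PySem.Int.floordiv M (u + s)
        else if 0 ≤ M then c else 0) ≤ c := min_le_left _ _
    omega
  · by_cases hd : 0 < u + s
    · set q := PySem.Int.floordiv M (u + s) with hq
      have hbr : ∀ x : Int, x ≤ q ↔ x * (u + s) ≤ M := fun x =>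
        PySem.Int.le_floordiv_iff_mul_le hd
      rw [if_pos hd]
      apply pvBinSearch_eq c u s m (max 0 (min c q)) (le_of_lt hd)
      · intro ht
        have h1 : min c q ≤ q := min_le_right _ _
        have h2 : max 0 (min c q) = min c q := by omega
        rw [h2] at ht ⊢
        calc min c q * (u + s) ≤ q * (u + s) :=
              mul_le_mul_of_nonneg_right h1 (le_of_lt hd)
          _ ≤ M := (hbr q).mp le_rfl
      · have := min_le_left c q; omega
      · intro x hxc hxM
        have := (hbr x).mpr hxM
        omega
      · rfl
      · omega
      · omega
      · have := min_le_left c q; omega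
      · exact le_rfl
    · rw [if_neg hd]
      by_cases hb : 0 ≤ M
      · rw [if_pos hb]
        have hall : ∀ k, 0 < k → k ≤ c → m + (c - k) * s ≥ k * u := by
          intro k hk1 hk2
          nlinarith
        rw [pvBinSearch_all c u s m (c - 0).toNat 0 c rfl (by omega) hall]
        omega
      · have hd0 : u + s = 0 := by omega
        rw [if_neg hb]
        rw [pvBinSearch_eq c u s m 0 (by omega) (by omega) (by omega)
          (fun x hxc hxM => by rw [hd0, mul_zero] at hxM; omega)
          (c - 0).toNat 0 c rfl le_rfl le_rfl (by omega) le_rfl]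
        omega

-- ===== VERDICT (by name: the statement is the Claim_ definition above) =====
theorem maxUpgrades_spec : Claim_equal_maxUpgrades := by
  intro count upgrade sell money _hdom hpre
  obtain ⟨hlu, hls, hlm, hall⟩ := hpre
  unfold Spec_maxUpgrades maxUpgrades maxUpgrades_alt
  rw [PySem.List.foldl_append_singleton_eq_map, List.nil_append,
      PySem.List.pyRange_zero_natCast]
  have hlz : (count.zip (upgrade.zip (sell.zip money))).length = count.length := by
    simp [List.length_zip]; omega
  apply List.ext_getElem
  · simp [hlz]
  · intro k hk1 hk2
    simp only [List.length_map, List.length_range] at hk1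
    have hkc : k < count.length := hk1
    have hkz : k < (count.zip (upgrade.zip (sell.zip money))).length := by omega
    simp only [List.getElem_map, List.getElem_range]
    have hmem : (count.zip (upgrade.zip (sell.zip money)))[k] ∈
        count.zip (upgrade.zip (sell.zip money)) := List.getElem_mem hkz
    have hz : (count.zip (upgrade.zip (sell.zip money)))[k] =
        (count[k], (upgrade[k]'(by omega), (sell[k]'(by omega), money[k]'(by omega)))) := by
      simp [List.getElem_zip]
    have hcond := List.all_eq_true.mp hall _ hmem
    rw [hz] at hcond
    simp only [decide_eq_true_eq] at hcond
    have hget : ∀ (xs : List Int) (hkx : k < xs.length),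
        PySem.List.pyGetD xs ((k : Nat) : Int) 0 = xs[k]'hkx := by
      intro xs hkx
      rw [PySem.List.pyGetD_natCast]
      exact List.getD_eq_getElem xs 0 hkx
    rw [hget count hkc, hget upgrade (by omega), hget sell (by omega), hget money (by omega), hz]
    exact pvBinSearch_closed _ _ _ _ hcond
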